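-- pv_equiv track=rewrite | github.com/Xellouey/LessonMassiveKwork | NikolayAIBot/utils.py | move_dict_item
-- ===== SOURCE A (Python) =====
-- def move_dict_item(dictionary, key, new_position):
--     if key not in dictionary:
--         raise KeyError(f"Key '{key}' not found in dictionary")
--
--     if new_position < 0 or new_position >= len(dictionary):
--         raise IndexError("New position is out of bounds")
--
--     items = list(dictionary.items())
--
--     current_position = next(i for i, (k, _) in enumerate(items) if k == key)
--
--     if current_position == new_position:
--         return dictionary
--
--     item = items.pop(current_position)
--     items.insert(new_position, item)
--
--     return dict(items)
-- ===== SOURCE B (Python) =====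
-- def move_dict_item(dictionary, key, new_position):
--     if key not in dictionary:
--         raise KeyError(f"Key '{key}' not found in dictionary")
--
--     if new_position < 0 or new_position >= len(dictionary):
--         raise IndexError("New position is out of bounds")
--
--     moved = (key, dictionary[key])
--     result = []
--     for k, v in dictionary.items():
--         if k == key:
--             if len(result) == new_position:
--                 # the item is already at the requested position
--                 return dictionary
--             continue
--         if len(result) == new_position:
--             result.append(moved)
--         result.append((k, v))
--     if len(result) == new_position:
--         result.append(moved)
--     return dict(result)
-- ===== Notes on version B (the rewrite author's own statement) =====
-- stated objective: alternative
-- what changed: Instead of locating the key's index, popping it from a copied items list and re-inserting at the new position, B rebuilds the pairs in a single pass that skips the moved key and splices the (key, value) pair in when the output reaches the target length (returning the dict unchanged when the key is met exactly at the target length).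
import Mathlib
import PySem

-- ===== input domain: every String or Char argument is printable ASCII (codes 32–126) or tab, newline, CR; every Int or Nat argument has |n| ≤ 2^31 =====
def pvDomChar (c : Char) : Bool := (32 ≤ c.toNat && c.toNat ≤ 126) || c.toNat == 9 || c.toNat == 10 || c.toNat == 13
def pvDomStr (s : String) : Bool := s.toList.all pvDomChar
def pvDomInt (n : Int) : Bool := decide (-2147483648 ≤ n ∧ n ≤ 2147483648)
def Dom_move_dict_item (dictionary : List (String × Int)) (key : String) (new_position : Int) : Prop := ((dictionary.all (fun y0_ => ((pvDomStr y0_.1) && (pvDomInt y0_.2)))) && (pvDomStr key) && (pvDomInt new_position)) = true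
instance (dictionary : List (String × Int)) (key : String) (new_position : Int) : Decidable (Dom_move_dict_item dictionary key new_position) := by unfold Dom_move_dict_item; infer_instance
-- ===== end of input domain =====

-- B rebuilds the dict in one pass (skip the moved key, splice the moved pair in when the output
-- reaches the target length) instead of A's find-index / pop / insert on a copied items list;
-- alternative decomposition, same O(n) cost.

-- ===== PORT A =====
def move_dict_item (dictionary : List (String × Int)) (key : String) (new_position : Int) : List (String × Int) :=
  if (PySem.Dict.mk dictionary).contains key = false then []      -- Python: raise KeyError
  else if new_position < 0 ∨ (dictionary.length : Int) ≤ new_position then []  -- Python: raise IndexError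
  else
    let items := dictionary
    let current_position : Int := (items.findIdx (fun p => p.1 == key) : Int)
    if current_position = new_position then dictionary
    else
      match PySem.List.pop? items current_position with
      | none => []
      | some (item, rest) =>
        (PySem.Dict.ofList (PySem.List.insert rest new_position item)).items

-- ===== PORT B =====
-- one appended element of the rebuild loop (the two `result.append` lines)
def bStep (moved : String × Int) (new_position : Int)
    (acc : List (String × Int)) (p : String × Int) : List (String × Int) :=
  (if (acc.length : Int) = new_position then acc ++ [moved] else acc) ++ [p]

-- the `for k, v in dictionary.items()` loop; `none` encodes the early `return dictionary`
def bLoop (key : String) (new_position : Int) (moved : String × Int)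
    (acc : List (String × Int)) : List (String × Int) → Option (List (String × Int))
  | [] => some (if (acc.length : Int) = new_position then acc ++ [moved] else acc)
  | p :: rest =>
    if p.1 == key then
      if (acc.length : Int) = new_position then none
      else bLoop key new_position moved acc rest
    else bLoop key new_position moved (bStep moved new_position acc p) rest

def move_dict_item_alt (dictionary : List (String × Int)) (key : String) (new_position : Int) : List (String × Int) :=
  if (PySem.Dict.mk dictionary).contains key = false then []      -- Python: raise KeyError
  else if new_position < 0 ∨ (dictionary.length : Int) ≤ new_position then []  -- Python: raise IndexError
  else
    match (PySem.Dict.mk dictionary).get? key with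
    | none => []    -- unreachable: the first guard ensured the key is present
    | some v =>
      match bLoop key new_position (key, v) [] dictionary with
      | none => dictionary
      | some r => (PySem.Dict.ofList r).items

-- ===== PRECONDITION & SPEC =====
-- Pre_ excludes inputs where Python A raises (missing key: KeyError; position < 0 or ≥ len: IndexError)
-- and association lists with duplicate keys, which do not represent any Python dict input.
def Pre_move_dict_item (dictionary : List (String × Int)) (key : String) (new_position : Int) : Prop :=
  (dictionary.map Prod.fst).Nodup ∧ key ∈ dictionary.map Prod.fst ∧
    0 ≤ new_position ∧ new_position < dictionary.length

instance (dictionary : List (String × Int)) (key : String) (new_position : Int) : Decidable (Pre_move_dict_item dictionary key new_position) := by unfold Pre_move_dict_item; infer_instance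

def pvWitness_move_dict_item : (List (String × Int)) × String × Int := ([("a", 1), ("b", 2)], "a", 1)

def Spec_move_dict_item (dictionary : List (String × Int)) (key : String) (new_position : Int) (out : List (String × Int)) : Prop := out = move_dict_item_alt dictionary key new_position
instance (dictionary : List (String × Int)) (key : String) (new_position : Int) (out : List (String × Int)) : Decidable (Spec_move_dict_item dictionary key new_position out) := by unfold Spec_move_dict_item; infer_instance

-- ===== CLAIM (what is proved, stated in full; the proofs are below) =====
def Claim_equal_move_dict_item : Prop := ∀ (dictionary : List (String × Int)) (key : String) (new_position : Int), Dom_move_dict_item dictionary key new_position → Pre_move_dict_item dictionary key new_position → Spec_move_dict_item dictionary key new_position (move_dict_item dictionary key new_position)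

-- ===== LEMMAS AND PROOFS =====

theorem key_split (d : List (String × Int)) (key : String) (h : key ∈ d.map Prod.fst) :
    ∃ pre v suf, d = pre ++ (key, v) :: suf ∧ key ∉ pre.map Prod.fst := by
  induction d with
  | nil => simp at h
  | cons p rest ih =>
    by_cases hp : p.1 = key
    · exact ⟨[], p.2, rest, by simp [← hp], by simp⟩
    · rw [List.map_cons, List.mem_cons] at h
      have hm : key ∈ rest.map Prod.fst := by
        rcases h with h1 | h1
        · exact absurd h1.symm hp
        · exact h1
      obtain ⟨pre, v, suf, hd, hpre⟩ := ih hm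
      refine ⟨p :: pre, v, suf, by simp [hd], ?_⟩
      intro hmem
      rw [List.map_cons, List.mem_cons] at hmem
      rcases hmem with h1 | h1
      · exact hp h1.symm
      · exact hpre h1

theorem findIdx_split (pre suf : List (String × Int)) (key : String) (v : Int)
    (hpre : key ∉ pre.map Prod.fst) :
    List.findIdx (fun p => p.1 == key) (pre ++ (key, v) :: suf) = pre.length := by
  induction pre with
  | nil => simp [List.findIdx_cons]
  | cons q pre ih =>
    have hq : q.1 ≠ key := fun h => hpre (by simp [h])
    have hpre' : key ∉ pre.map Prod.fst := fun h => hpre (by simp [h])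
    simp [List.findIdx_cons, show (q.1 == key) = false by simpa using hq, ih hpre']

theorem eraseIdx_split (pre suf : List (String × Int)) (x : String × Int) :
    (pre ++ x :: suf).eraseIdx pre.length = pre ++ suf := by
  induction pre with
  | nil => simp
  | cons q pre ih => simp [List.eraseIdx_cons_succ, ih]

theorem get?_mk_split (pre suf : List (String × Int)) (key : String) (v : Int)
    (hpre : key ∉ pre.map Prod.fst) :
    (PySem.Dict.mk (pre ++ (key, v) :: suf)).get? key = some v := by
  induction pre with
  | nil => simp [PySem.Dict.get?_mk_cons]
  | cons q pre ih =>
    have hq : q.1 ≠ key := fun h => hpre (by simp [h])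
    have hpre' : key ∉ pre.map Prod.fst := fun h => hpre (by simp [h])
    rcases q with ⟨qk, qv⟩
    simp only [List.cons_append, PySem.Dict.get?_mk_cons]
    simp [show (qk == key) = false by simpa using hq, ih hpre']

theorem g_char (np : Int) (moved : String × Int) (xs acc : List (String × Int)) :
    xs.foldl (bStep moved np) acc =
      if (acc.length : Int) ≤ np ∧ np < acc.length + xs.length then
        acc ++ xs.take (np.toNat - acc.length) ++ moved :: xs.drop (np.toNat - acc.length)
      else acc ++ xs := by
  induction xs generalizing acc with
  | nil =>
    rw [if_neg (by simp only [List.length_nil, Nat.cast_zero, add_zero]; omega)]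
    simp
  | cons x xs ih =>
    simp only [List.foldl_cons, bStep]
    by_cases h0 : (acc.length : Int) = np
    · rw [if_pos h0, ih]
      rw [if_neg (by simp only [List.length_append, List.length_cons, List.length_nil]; push_cast; omega)]
      rw [if_pos ⟨by omega, by simp only [List.length_cons]; push_cast; omega⟩]
      have ht : np.toNat - acc.length = 0 := by omega
      simp [ht]
    · rw [if_neg h0, ih]
      by_cases hc : (acc.length : Int) + 1 ≤ np ∧ np < (acc.length : Int) + 1 + xs.length
      · rw [if_pos (by simp only [List.length_append, List.length_cons, List.length_nil]; push_cast; omega)]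
        rw [if_pos (by simp only [List.length_cons]; push_cast; omega)]
        have ht : np.toNat - acc.length = (np.toNat - (acc ++ [x]).length) + 1 := by
          simp only [List.length_append, List.length_cons, List.length_nil]; omega
        rw [ht]
        simp
      · rw [if_neg (by simp only [List.length_append, List.length_cons, List.length_nil]; push_cast; omega)]
        rw [if_neg (by simp only [List.length_cons]; push_cast; omega)]
        simp

theorem bLoop_free (key : String) (np : Int) (moved : String × Int)
    (xs acc : List (String × Int)) (hxs : ∀ p ∈ xs, p.1 ≠ key) :
    bLoop key np moved acc xs =
      some (if (acc.length : Int) ≤ np ∧ np ≤ acc.length + xs.length then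
        acc ++ xs.take (np.toNat - acc.length) ++ moved :: xs.drop (np.toNat - acc.length)
      else acc ++ xs) := by
  induction xs generalizing acc with
  | nil =>
    simp only [bLoop]
    by_cases h0 : (acc.length : Int) = np
    · rw [if_pos h0]
      rw [if_pos (by simp only [List.length_nil, Nat.cast_zero, add_zero]; omega)]
      have ht : np.toNat - acc.length = 0 := by omega
      simp [ht]
    · rw [if_neg h0]
      rw [if_neg (by simp only [List.length_nil, Nat.cast_zero, add_zero]; omega)]
      simp
  | cons x xs ih =>
    have hx : x.1 ≠ key := hxs x (by simp)
    have hxs' : ∀ p ∈ xs, p.1 ≠ key := fun p hp => hxs p (by simp [hp])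
    simp only [bLoop, bStep, show (x.1 == key) = false by simpa using hx, Bool.false_eq_true,
      if_false]
    rw [ih _ hxs']
    by_cases h0 : (acc.length : Int) = np
    · rw [if_pos h0]
      rw [if_neg (by simp only [List.length_append, List.length_cons, List.length_nil]; push_cast; omega)]
      rw [if_pos ⟨by omega, by simp only [List.length_cons]; push_cast; omega⟩]
      have ht : np.toNat - acc.length = 0 := by omega
      simp [ht]
    · rw [if_neg h0]
      by_cases hc : (acc.length : Int) + 1 ≤ np ∧ np ≤ (acc.length : Int) + 1 + xs.length
      · rw [if_pos (by simp only [List.length_append, List.length_cons, List.length_nil]; push_cast; omega)]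
        rw [if_pos (by simp only [List.length_cons]; push_cast; omega)]
        have ht : np.toNat - acc.length = (np.toNat - (acc ++ [x]).length) + 1 := by
          simp only [List.length_append, List.length_cons, List.length_nil]; omega
        rw [ht]
        simp
      · rw [if_neg (by simp only [List.length_append, List.length_cons, List.length_nil]; push_cast; omega)]
        rw [if_neg (by simp only [List.length_cons]; push_cast; omega)]
        simp

theorem bLoop_append (key : String) (np : Int) (moved : String × Int)
    (xs ys acc : List (String × Int)) (hxs : ∀ p ∈ xs, p.1 ≠ key) :
    bLoop key np moved acc (xs ++ ys) = bLoop key np moved (xs.foldl (bStep moved np) acc) ys := by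
  induction xs generalizing acc with
  | nil => simp
  | cons x xs ih =>
    have hx : x.1 ≠ key := hxs x (by simp)
    simp only [List.cons_append, bLoop, show (x.1 == key) = false by simpa using hx,
      Bool.false_eq_true, if_false, List.foldl_cons]
    exact ih _ (fun p hp => hxs p (by simp [hp]))

theorem main_eq (pre suf : List (String × Int)) (key : String) (v : Int) (np : Int)
    (hpre : key ∉ pre.map Prod.fst)
    (hnd : (((pre ++ (key, v) :: suf) : List (String × Int)).map Prod.fst).Nodup)
    (h0 : 0 ≤ np) (hlt : np < ((pre ++ (key, v) :: suf) : List (String × Int)).length) :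
    move_dict_item (pre ++ (key, v) :: suf) key np
      = move_dict_item_alt (pre ++ (key, v) :: suf) key np := by
  have hlen : ((pre ++ (key, v) :: suf) : List (String × Int)).length
      = pre.length + suf.length + 1 := by simp; omega
  have hget : (PySem.Dict.mk (pre ++ (key, v) :: suf)).get? key = some v :=
    get?_mk_split pre suf key v hpre
  have hcont : (PySem.Dict.mk (pre ++ (key, v) :: suf)).contains key = true := by
    rw [PySem.Dict.contains_eq_isSome_get?, hget]; rfl
  have hnd1 : (key :: (pre.map Prod.fst ++ suf.map Prod.fst)).Nodup := by
    rw [← List.nodup_middle]; simpa using hnd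
  have hsuf : ∀ p ∈ suf, p.1 ≠ key := by
    intro p hp hk
    exact (List.nodup_cons.mp hnd1).1
      (List.mem_append.mpr (Or.inr (List.mem_map.mpr ⟨p, hp, hk⟩)))
  have hprel : ∀ p ∈ pre, p.1 ≠ key := by
    intro p hp hk
    exact hpre (List.mem_map.mpr ⟨p, hp, hk⟩)
  have hfind : List.findIdx (fun p => p.1 == key) (pre ++ (key, v) :: suf) = pre.length :=
    findIdx_split pre suf key v hpre
  have hguard : ¬(np < 0 ∨ (((pre ++ (key, v) :: suf) : List (String × Int)).length : Int) ≤ np) := by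
    omega
  have hA : move_dict_item (pre ++ (key, v) :: suf) key np
      = if ((pre.length : Nat) : Int) = np then pre ++ (key, v) :: suf
        else match PySem.List.pop? (pre ++ (key, v) :: suf) ((pre.length : Nat) : Int) with
          | none => []
          | some (item, rest) => (PySem.Dict.ofList (PySem.List.insert rest np item)).items := by
    simp only [move_dict_item, hcont, Bool.true_eq_false, if_false, hfind]
    rw [if_neg hguard]
  have hB : move_dict_item_alt (pre ++ (key, v) :: suf) key np
      = match bLoop key np (key, v) [] (pre ++ (key, v) :: suf) with
        | none => pre ++ (key, v) :: suf
        | some r => (PySem.Dict.ofList r).items := by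
    simp only [move_dict_item_alt, hcont, Bool.true_eq_false, if_false, hget]
    rw [if_neg hguard]
  rw [hA, hB, bLoop_append key np (key, v) pre ((key, v) :: suf) [] hprel, g_char]
  simp only [List.length_nil, Nat.cast_zero, zero_add, Nat.sub_zero, List.nil_append]
  by_cases hc : ((pre.length : Nat) : Int) = np
  · -- the key already sits at the requested position: both sides return the dictionary
    rw [if_pos hc, if_neg (by omega)]
    simp only [bLoop, beq_self_eq_true, if_true, if_pos hc]
  · rw [if_neg hc]
    have hplt : pre.length < ((pre ++ (key, v) :: suf) : List (String × Int)).length := by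
      rw [hlen]; omega
    have hgetc : ((pre ++ (key, v) :: suf) : List (String × Int))[pre.length]'hplt = (key, v) := by
      rw [List.getElem_append_right (Nat.le_refl _)]
      simp
    have hnp' : np = ((np.toNat : Nat) : Int) := by omega
    have hle : np.toNat ≤ ((pre ++ suf) : List (String × Int)).length := by
      rw [hlen] at hlt; simp only [List.length_append]; omega
    have hA2 : (match PySem.List.pop? (pre ++ (key, v) :: suf) ((pre.length : Nat) : Int) with
          | none => ([] : List (String × Int))
          | some (item, rest) => (PySem.Dict.ofList (PySem.List.insert rest np item)).items)
        = (PySem.Dict.ofList (List.take np.toNat (pre ++ suf)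
            ++ (key, v) :: List.drop np.toNat (pre ++ suf))).items := by
      rw [PySem.List.pop?_natCast _ _ hplt, hgetc, eraseIdx_split]
      conv_lhs => rw [hnp']
      show (PySem.Dict.ofList (PySem.List.insert (pre ++ suf) ((np.toNat : Nat) : Int) (key, v))).items
        = (PySem.Dict.ofList (List.take np.toNat (pre ++ suf)
            ++ (key, v) :: List.drop np.toNat (pre ++ suf))).items
      rw [PySem.List.insert_natCast _ _ _ hle]
    rw [hA2]
    by_cases hlt2 : np < (pre.length : Int)
    · -- the pair moves towards the front: it is spliced in while scanning `pre`
      rw [if_pos ⟨h0, hlt2⟩]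
      simp only [bLoop, beq_self_eq_true, if_true]
      rw [if_neg (by simp only [List.length_append, List.length_cons, List.length_take, List.length_drop]; push_cast; omega)]
      rw [bLoop_free key np (key, v) suf _ hsuf]
      rw [if_neg (by simp only [List.length_append, List.length_cons, List.length_take, List.length_drop]; push_cast; omega)]
      have hsplit : List.take np.toNat (pre ++ suf) ++ (key, v) :: List.drop np.toNat (pre ++ suf)
          = (List.take np.toNat pre ++ (key, v) :: List.drop np.toNat pre) ++ suf := by
        rw [List.take_append, List.drop_append]
        have h1 : np.toNat - pre.length = 0 := by omega
        simp [h1]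
      rw [hsplit]
    · -- the pair moves towards the back: it is spliced in while scanning `suf`
      rw [if_neg (by omega)]
      simp only [bLoop, beq_self_eq_true, if_true, if_neg hc]
      rw [bLoop_free key np (key, v) suf _ hsuf]
      rw [if_pos ⟨by omega, by rw [hlen] at hlt; push_cast at hlt ⊢; omega⟩]
      have hsplit : List.take np.toNat (pre ++ suf) ++ (key, v) :: List.drop np.toNat (pre ++ suf)
          = pre ++ (List.take (np.toNat - pre.length) suf
            ++ (key, v) :: List.drop (np.toNat - pre.length) suf) := by
        rw [List.take_append, List.drop_append]
        have h1 : List.take np.toNat pre = pre := List.take_of_length_le (by omega)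
        have h2 : List.drop np.toNat pre = [] := List.drop_eq_nil_of_le (by omega)
        simp [h1, h2]
      rw [hsplit]
      simp [List.append_assoc]

-- ===== VERDICT (by name: the statement is the Claim_ definition above) =====
theorem move_dict_item_spec : Claim_equal_move_dict_item := by
  intro dictionary key np _ hp
  obtain ⟨hnd, hmem, h0, hlt⟩ := hp
  obtain ⟨pre, v, suf, hd, hpr⟩ := key_split dictionary key hmem
  subst hd
  unfold Spec_move_dict_item
  exact main_eq pre suf key v np hpr hnd h0 hlt
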